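-- pv_equiv track=rewrite | github.com/fabianomonteirofarias-prof/dsa-gfg | 01 - Logic Building/035. Fraction to Recurring Decimal.py | naive_approach
-- ===== SOURCE A (Python) =====
-- def naive_approach(a: int, b:int) -> str:
--     # signal (+/-)
--     aux = "-" if (a < 0) ^ (b < 0) else ""
--     # turn absolute value
--     a, b = abs(a), abs(b)
--     # first part
--     aux += str(a // b)
--     rem = a % b # rest of division
--
--     if rem == 0: # if not rest, return answer
--         return aux
--
--     # point
--     aux += "."
--     mp = {}
--
--     while rem > 0:
--         if rem in mp:
--             aux = aux[:mp[rem]] + "(" + aux[mp[rem]:] + ")"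
--             break
--
--         mp[rem] = len(aux)
--         rem *= 10
--
--         aux += str(rem // b)
--         rem %= b
--
--     return aux
-- ===== SOURCE B (Python) =====
-- def naive_approach(a, b):
--     sign = "-" if (a < 0) ^ (b < 0) else ""
--     a, b = abs(a), abs(b)
--     head = sign + str(a // b)
--     rem = a % b
--     if rem == 0:
--         return head
--     # Floyd tortoise/hare cycle detection on the remainder map r -> 10*r % b,
--     # with no remainder-to-position dictionary at all (0 is a fixed point of the
--     # map, so terminating expansions are the cycle {0}).
--     t = 10 * rem % b
--     h = 10 * (10 * rem % b) % b
--     while t != h: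
--         t = 10 * t % b
--         h = 10 * (10 * h % b) % b
--     # cycle-start phase: p ends as the first remainder on the cycle, mu its index
--     p = rem
--     mu = 0
--     while p != h:
--         p = 10 * p % b
--         h = 10 * h % b
--         mu += 1
--     # emit the mu non-repeating digits
--     out = []
--     r = rem
--     for _ in range(mu):
--         r *= 10
--         out.append(str(r // b))
--         r %= b
--     if p == 0:
--         return head + "." + "".join(out)
--     # cycle length lam = number of steps for p to return to itself
--     lam = 1
--     s = 10 * p % b
--     while s != p:
--         s = 10 * s % b
--         lam += 1
--     out.append("(")
--     for _ in range(lam):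
--         r *= 10
--         out.append(str(r // b))
--         r %= b
--     out.append(")")
--     return head + "." + "".join(out)
-- ===== Notes on version B (the rewrite author's own statement) =====
-- stated objective: alternative
-- what changed: B replaces A's remainder-to-position dictionary cycle detection with Floyd's tortoise/hare pointer algorithm on the remainder map r -> 10*r % b (0 being a fixed point handles terminating expansions), then re-runs the long division to emit the digits; it keeps no map and no growing string, using O(1) auxiliary space.
import Mathlib
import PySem

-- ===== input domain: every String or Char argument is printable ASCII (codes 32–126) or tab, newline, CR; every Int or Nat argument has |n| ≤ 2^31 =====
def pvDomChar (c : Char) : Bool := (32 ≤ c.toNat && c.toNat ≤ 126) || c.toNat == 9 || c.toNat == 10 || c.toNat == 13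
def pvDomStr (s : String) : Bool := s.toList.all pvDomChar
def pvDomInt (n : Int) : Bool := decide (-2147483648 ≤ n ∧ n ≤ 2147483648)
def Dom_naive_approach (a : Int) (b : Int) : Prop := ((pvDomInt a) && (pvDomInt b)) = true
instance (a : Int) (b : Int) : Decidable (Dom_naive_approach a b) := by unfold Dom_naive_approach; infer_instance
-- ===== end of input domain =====

-- B replaces A's remainder→position dictionary with Floyd's tortoise/hare cycle detection on
-- the remainder map r ↦ 10·r % b (O(1) auxiliary space), then re-runs the division to emit digits.

-- ===== PORT A =====
-- A's while loop: state (aux, mp, rem); the fuel b.toNat+1 is a totality guard only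
-- (each iteration inserts a fresh key, so the loop body runs at most b times).
-- aux[:mp[rem]] / aux[mp[rem]:] are PySem.List.slice on the char list (exact).
def naiveLoopA (b : Int) (fuel : Nat) (aux : List Char) (mp : PySem.Dict Int Int)
    (rem : Int) : List Char :=
  match fuel with
  | 0 => aux
  | fuel + 1 =>
    if rem > 0 then
      match mp.get? rem with
      | some pos =>
          PySem.List.slice aux none (some pos) ++ '(' ::
            (PySem.List.slice aux (some pos) none ++ [')'])
      | none =>
          let mp' := mp.insert rem (aux.length : Int)
          let rem' := rem * 10
          let aux' := aux ++ PySem.Int.toChars (PySem.Int.floordiv rem' b)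
          naiveLoopA b fuel aux' mp' (PySem.Int.mod rem' b)
    else aux

def naive_approach (a : Int) (b : Int) : String :=
  let sign : List Char := if xor (decide (a < 0)) (decide (b < 0)) then ['-'] else []
  let a' := |a|
  let b' := |b|
  let aux := sign ++ PySem.Int.toChars (PySem.Int.floordiv a' b')
  let rem := PySem.Int.mod a' b'
  if rem = 0 then String.ofList aux
  else String.ofList (naiveLoopA b' (b'.toNat + 1) (aux ++ ['.']) PySem.Dict.empty rem)

-- ===== PORT B =====
-- Source B's Floyd meet loop 'while t != h' (tortoise one step, hare two); fuel is a totality guard.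
def altMeet (b : Int) (fuel : Nat) (t h : Int) : Int :=
  match fuel with
  | 0 => h
  | fuel + 1 =>
    if t ≠ h then
      altMeet b fuel (PySem.Int.mod (10 * t) b)
        (PySem.Int.mod (10 * (PySem.Int.mod (10 * h) b)) b)
    else h

-- Source B's cycle-start loop 'while p != h': returns (p, mu); fuel is a totality guard.
def altMu (b : Int) (fuel : Nat) (p h : Int) (mu : Nat) : Int × Nat :=
  match fuel with
  | 0 => (p, mu)
  | fuel + 1 =>
    if p ≠ h then
      altMu b fuel (PySem.Int.mod (10 * p) b) (PySem.Int.mod (10 * h) b) (mu + 1)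
    else (p, mu)

-- Source B's cycle-length loop 'while s != p': returns lam; fuel is a totality guard.
def altLam (b p : Int) (fuel : Nat) (s : Int) (lam : Nat) : Nat :=
  match fuel with
  | 0 => lam
  | fuel + 1 =>
    if s ≠ p then altLam b p fuel (PySem.Int.mod (10 * s) b) (lam + 1) else lam

-- Source B's 'for _ in range(n): r *= 10; out.append(str(r // b)); r %= b' — digits and final remainder.
def altEmit (b : Int) : Nat → Int → List Char × Int
  | 0, r => ([], r)
  | n + 1, r =>
    let r' := 10 * r
    let rest := altEmit b n (PySem.Int.mod r' b)
    (PySem.Int.toChars (PySem.Int.floordiv r' b) ++ rest.1, rest.2)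

def naive_approach_alt (a : Int) (b : Int) : String :=
  let sign : List Char := if xor (decide (a < 0)) (decide (b < 0)) then ['-'] else []
  let a' := |a|
  let b' := |b|
  let head := sign ++ PySem.Int.toChars (PySem.Int.floordiv a' b')
  let rem := PySem.Int.mod a' b'
  if rem = 0 then String.ofList head
  else
    let t := PySem.Int.mod (10 * rem) b'
    let h0 := PySem.Int.mod (10 * (PySem.Int.mod (10 * rem) b')) b'
    let m := altMeet b' (b'.toNat + 1) t h0
    let pm := altMu b' (b'.toNat + 1) rem m 0
    let pre := altEmit b' pm.2 rem
    if pm.1 = 0 then String.ofList (head ++ '.' :: pre.1)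
    else
      let lam := altLam b' pm.1 (b'.toNat + 1) (PySem.Int.mod (10 * pm.1) b') 1
      let cyc := altEmit b' lam pre.2
      String.ofList (head ++ '.' :: (pre.1 ++ '(' :: (cyc.1 ++ [')'])))

-- ===== PRECONDITION & SPEC =====
-- Pre_ excludes exactly b = 0, where A raises ZeroDivisionError (B raises there too).
def Pre_naive_approach (a : Int) (b : Int) : Prop := b ≠ 0
instance (a : Int) (b : Int) : Decidable (Pre_naive_approach a b) := by
  unfold Pre_naive_approach; infer_instance
def pvWitness_naive_approach : Int × Int := (1, 3)

def Spec_naive_approach (a : Int) (b : Int) (out : String) : Prop := out = naive_approach_alt a b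
instance (a : Int) (b : Int) (out : String) : Decidable (Spec_naive_approach a b out) := by
  unfold Spec_naive_approach; infer_instance

-- ===== CLAIM (what is proved, stated in full; the proofs are below) =====
def Claim_equal_naive_approach : Prop := ∀ (a : Int) (b : Int), Dom_naive_approach a b → Pre_naive_approach a b → Spec_naive_approach a b (naive_approach a b)

-- ===== LEMMAS AND PROOFS =====

-- The remainder map, its orbit, and the digit each remainder emits.
def pvF (b r : Int) : Int := PySem.Int.mod (10 * r) b
def pvSeq (b x0 : Int) (i : Nat) : Int := (pvF b)^[i] x0
def pvDig (b x0 : Int) (i : Nat) : List Char :=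
  PySem.Int.toChars (PySem.Int.floordiv (10 * pvSeq b x0 i) b)
def pvSeg (b x0 : Int) (j n : Nat) : List Char :=
  (List.range n).flatMap (fun k => pvDig b x0 (j + k))

-- A's dictionary after t loop iterations.
def mpAt (b x0 L : Int) (t : Nat) : PySem.Dict Int Int :=
  (List.range t).foldl (fun m i => m.insert (pvSeq b x0 i) (L + (i : Int))) PySem.Dict.empty

theorem pvSeq_succ (b x0 : Int) (i : Nat) :
    pvSeq b x0 (i + 1) = pvF b (pvSeq b x0 i) := by
  simp [pvSeq, Function.iterate_succ_apply']

theorem pvSeq_add (b x0 : Int) (i k : Nat) :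
    pvSeq b x0 (i + k) = (pvF b)^[k] (pvSeq b x0 i) := by
  simp [pvSeq, add_comm i k, Function.iterate_add_apply]

theorem pvSeq_bounds (b x0 : Int) (hb : 0 < b) (h0 : 0 ≤ x0) (hlt : x0 < b) :
    ∀ i, 0 ≤ pvSeq b x0 i ∧ pvSeq b x0 i < b := by
  intro i
  induction i with
  | zero => exact ⟨h0, hlt⟩
  | succ i _ =>
    rw [pvSeq_succ]
    exact ⟨PySem.Int.mod_nonneg _ hb, PySem.Int.mod_lt _ hb⟩

theorem pvSeq_zero_tail (b x0 : Int) (i : Nat) (h : pvSeq b x0 i = 0) :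
    ∀ k, pvSeq b x0 (i + k) = 0 := by
  intro k
  induction k with
  | zero => simpa using h
  | succ k ih =>
    rw [show i + (k+1) = (i+k) + 1 by omega, pvSeq_succ, ih]
    simp [pvF, PySem.Int.mod]

theorem toChars_len_one (n : Int) (h0 : 0 ≤ n) (h1 : n < 10) :
    (PySem.Int.toChars n).length = 1 := by
  interval_cases n <;> rfl

theorem pvDig_len (b x0 : Int) (hb : 0 < b) (h0 : 0 ≤ x0) (hlt : x0 < b) (i : Nat) :
    (pvDig b x0 i).length = 1 := by
  obtain ⟨hge, hl⟩ := pvSeq_bounds b x0 hb h0 hlt i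
  refine toChars_len_one _ ?_ ?_
  · exact (PySem.Int.le_floordiv_iff_mul_le hb).mpr (by nlinarith)
  · exact (PySem.Int.floordiv_lt_iff_lt_mul hb).mpr (by nlinarith)

-- The combinatorial heart: the tail index mu and the cycle length lam of the orbit.
theorem exists_mu_lam (b x0 : Int) (hb : 0 < b) (h0 : 0 ≤ x0) (hlt : x0 < b) :
    ∃ mu lam : Nat, 1 ≤ lam ∧ mu + lam ≤ b.toNat ∧
      pvSeq b x0 (mu + lam) = pvSeq b x0 mu ∧
      (∀ j m : Nat, 0 < m → pvSeq b x0 (j + m) = pvSeq b x0 j → mu ≤ j ∧ lam ∣ m) := by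
  obtain ⟨x, hx, y, hy, hxy, hgxy⟩ :=
    Finset.exists_ne_map_eq_of_card_lt_of_maps_to
      (s := Finset.range (b.toNat + 1)) (t := Finset.Ico (0 : Int) b)
      (f := fun i => pvSeq b x0 i)
      (by rw [Int.card_Ico, Finset.card_range]; omega)
      (fun i _ => by simpa [Finset.mem_Ico] using pvSeq_bounds b x0 hb h0 hlt i)
  obtain ⟨s, t, hst, hts, hgs⟩ : ∃ s t, s < t ∧ t ≤ b.toNat ∧ pvSeq b x0 t = pvSeq b x0 s := by
    rcases lt_or_gt_of_ne hxy with h | h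
    · refine ⟨x, y, h, ?_, hgxy.symm⟩
      have := Finset.mem_range.mp hy; omega
    · refine ⟨y, x, h, ?_, hgxy⟩
      have := Finset.mem_range.mp hx; omega
  have hper : Function.IsPeriodicPt (pvF b) (t - s) (pvSeq b x0 s) := by
    show (pvF b)^[t - s] (pvSeq b x0 s) = pvSeq b x0 s
    rw [← pvSeq_add, show s + (t - s) = t by omega, hgs]
  have hq : 0 < t - s := by omega
  set f := pvF b with hf
  set lam := Function.minimalPeriod f (pvSeq b x0 s) with hlamdef
  have hlam_pos : 0 < lam := hper.minimalPeriod_pos hq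
  have hsper : pvSeq b x0 s ∈ Function.periodicPts f := ⟨t - s, hq, hper⟩
  have hmp : ∀ j m : Nat, 0 < m → pvSeq b x0 (j + m) = pvSeq b x0 j →
      Function.minimalPeriod f (pvSeq b x0 j) = lam := by
    intro j m hm hjm
    have hjp : Function.IsPeriodicPt f m (pvSeq b x0 j) := by
      show f^[m] (pvSeq b x0 j) = pvSeq b x0 j
      rw [← pvSeq_add, hjm]
    have hjper : pvSeq b x0 j ∈ Function.periodicPts f := ⟨m, hm, hjp⟩
    rcases le_total j s with h | h
    · have := Function.minimalPeriod_apply_iterate hjper (s - j)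
      rw [← pvSeq_add b x0 j (s - j), show j + (s - j) = s by omega] at this
      rw [← this]
    · have := Function.minimalPeriod_apply_iterate hsper (j - s)
      rw [← pvSeq_add b x0 s (j - s), show s + (j - s) = j by omega] at this
      rw [this]
  have key : ∀ j m : Nat, 0 < m → pvSeq b x0 (j + m) = pvSeq b x0 j →
      pvSeq b x0 (j + lam) = pvSeq b x0 j ∧ lam ∣ m := by
    intro j m hm hjm
    have h1 := hmp j m hm hjm
    have hjp : Function.IsPeriodicPt f m (pvSeq b x0 j) := by
      show f^[m] (pvSeq b x0 j) = pvSeq b x0 j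
      rw [← pvSeq_add, hjm]
    constructor
    · have h2 := Function.isPeriodicPt_minimalPeriod f (pvSeq b x0 j)
      rw [h1] at h2
      rw [pvSeq_add]
      exact h2
    · rw [← h1]
      exact hjp.minimalPeriod_dvd
  have hex : ∃ j, pvSeq b x0 (j + lam) = pvSeq b x0 j :=
    ⟨s, (key s (t - s) hq (by rw [show s + (t - s) = t by omega, hgs])).1⟩
  refine ⟨Nat.find hex, lam, hlam_pos, ?_, Nat.find_spec hex, ?_⟩
  · have hmu_le : Nat.find hex ≤ s :=
      Nat.find_min' hex (key s (t - s) hq (by rw [show s + (t - s) = t by omega, hgs])).1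
    have hlam_le : lam ≤ t - s :=
      Nat.le_of_dvd hq (key s (t - s) hq (by rw [show s + (t - s) = t by omega, hgs])).2
    omega
  · intro j m hm hjm
    obtain ⟨h1, h2⟩ := key j m hm hjm
    exact ⟨Nat.find_min' hex h1, h2⟩

-- Derived orbit facts, with mu/lam and their defining properties as hypotheses.
theorem per_step (b x0 : Int) (mu lam : Nat)
    (hspec : pvSeq b x0 (mu + lam) = pvSeq b x0 mu) :
    ∀ j, mu ≤ j → pvSeq b x0 (j + lam) = pvSeq b x0 j := by
  intro j hj
  have h1 : pvSeq b x0 (j + lam) = (pvF b)^[j - mu] (pvSeq b x0 (mu + lam)) := by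
    rw [← pvSeq_add, show mu + lam + (j - mu) = j + lam by omega]
  have h2 : pvSeq b x0 j = (pvF b)^[j - mu] (pvSeq b x0 mu) := by
    rw [← pvSeq_add, show mu + (j - mu) = j by omega]
  rw [h1, hspec, h2]

theorem per_ge (b x0 : Int) (mu lam : Nat)
    (hspec : pvSeq b x0 (mu + lam) = pvSeq b x0 mu) :
    ∀ j k, mu ≤ j → pvSeq b x0 (j + k * lam) = pvSeq b x0 j := by
  intro j k hj
  induction k with
  | zero => simp
  | succ k ih =>
    rw [show j + (k + 1) * lam = (j + k * lam) + lam by ring,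
      per_step b x0 mu lam hspec _ (by omega), ih]

theorem pv_distinct (b x0 : Int) (mu lam : Nat)
    (hkey : ∀ j m : Nat, 0 < m → pvSeq b x0 (j + m) = pvSeq b x0 j → mu ≤ j ∧ lam ∣ m) :
    ∀ i j, i < j → j < mu + lam → pvSeq b x0 i ≠ pvSeq b x0 j := by
  intro i j hij hj heq
  obtain ⟨h1, h2⟩ := hkey i (j - i) (by omega)
    (by rw [show i + (j - i) = j by omega]; exact heq.symm)
  have := Nat.le_of_dvd (by omega) h2
  omega

theorem pv_nz_lt_mu (b x0 : Int) (mu lam : Nat)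
    (hkey : ∀ j m : Nat, 0 < m → pvSeq b x0 (j + m) = pvSeq b x0 j → mu ≤ j ∧ lam ∣ m) :
    ∀ t, t < mu → pvSeq b x0 t ≠ 0 := by
  intro t ht hz
  have h1 : pvSeq b x0 (t + 1) = pvSeq b x0 t := by
    rw [hz]; simpa using pvSeq_zero_tail b x0 t hz 1
  exact absurd (hkey t 1 (by omega) h1).1 (by omega)

theorem pv_nz_col (b x0 : Int) (mu lam : Nat) (hlam : 1 ≤ lam)
    (hspec : pvSeq b x0 (mu + lam) = pvSeq b x0 mu)
    (hkey : ∀ j m : Nat, 0 < m → pvSeq b x0 (j + m) = pvSeq b x0 j → mu ≤ j ∧ lam ∣ m)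
    (hz : pvSeq b x0 mu ≠ 0) :
    ∀ t, t ≤ mu + lam → pvSeq b x0 t ≠ 0 := by
  intro t _ h0
  rcases lt_or_ge t mu with h | h
  · exact pv_nz_lt_mu b x0 mu lam hkey t h h0
  · apply hz
    have h1 : pvSeq b x0 (mu + t * lam) = pvSeq b x0 mu := per_ge b x0 mu lam hspec mu t le_rfl
    have h2 : pvSeq b x0 (t + (mu + t * lam - t)) = 0 := pvSeq_zero_tail b x0 t h0 _
    have hle : t ≤ t * lam := Nat.le_mul_of_pos_right t (by omega)
    rw [show t + (mu + t * lam - t) = mu + t * lam by omega] at h2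
    rw [← h1, h2]

-- Segment lemmas.
theorem pvSeg_zero (b x0 : Int) (j : Nat) : pvSeg b x0 j 0 = [] := by simp [pvSeg]

theorem pvSeg_succ (b x0 : Int) (j n : Nat) :
    pvSeg b x0 j (n + 1) = pvSeg b x0 j n ++ pvDig b x0 (j + n) := by
  simp [pvSeg, List.range_succ]

theorem pvSeg_cons (b x0 : Int) (j n : Nat) :
    pvSeg b x0 j (n + 1) = pvDig b x0 j ++ pvSeg b x0 (j + 1) n := by
  simp only [pvSeg, List.range_succ_eq_map, List.flatMap_cons, List.flatMap_map, Nat.add_zero]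
  congr 1
  have : (fun a : Nat => pvDig b x0 (j + a.succ)) = fun k : Nat => pvDig b x0 (j + 1 + k) := by
    funext k; congr 1; omega
  rw [this]

theorem pvSeg_len (b x0 : Int) (hb : 0 < b) (h0 : 0 ≤ x0) (hlt : x0 < b) (j n : Nat) :
    (pvSeg b x0 j n).length = n := by
  induction n with
  | zero => simp [pvSeg_zero]
  | succ n ih => rw [pvSeg_succ]; simp [ih, pvDig_len b x0 hb h0 hlt]

theorem pvSeg_split (b x0 : Int) (j m n : Nat) :
    pvSeg b x0 j (m + n) = pvSeg b x0 j m ++ pvSeg b x0 (j + m) n := by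
  induction n with
  | zero => simp [pvSeg_zero]
  | succ n ih =>
    rw [show m + (n + 1) = (m + n) + 1 by omega, pvSeg_succ, ih, pvSeg_succ,
      List.append_assoc, show j + (m + n) = j + m + n by omega]

-- A's dictionary lemmas.
theorem mpAt_zero (b x0 L : Int) : mpAt b x0 L 0 = PySem.Dict.empty := by simp [mpAt]

theorem mpAt_succ (b x0 L : Int) (t : Nat) :
    mpAt b x0 L (t + 1) = (mpAt b x0 L t).insert (pvSeq b x0 t) (L + (t : Int)) := by
  simp [mpAt, List.range_succ]

theorem mpAt_get_none (b x0 L : Int) (t : Nat) (r : Int)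
    (h : ∀ i, i < t → pvSeq b x0 i ≠ r) : (mpAt b x0 L t).get? r = none := by
  induction t with
  | zero => rw [mpAt_zero]; exact PySem.Dict.get?_empty r
  | succ t ih =>
    rw [mpAt_succ, PySem.Dict.get?_insert_of_ne _ _ (fun he => h t (by omega) he.symm)]
    exact ih (fun i hi => h i (by omega))

theorem mpAt_get_some (b x0 L : Int) (t j : Nat) (hj : j < t)
    (hfresh : ∀ i, j < i → i < t → pvSeq b x0 i ≠ pvSeq b x0 j) :
    (mpAt b x0 L t).get? (pvSeq b x0 j) = some (L + (j : Int)) := by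
  induction t with
  | zero => omega
  | succ t ih =>
    rw [mpAt_succ]
    rcases Nat.lt_or_ge j t with h | h
    · rw [PySem.Dict.get?_insert_of_ne _ _ (fun he => hfresh t h (by omega) he.symm)]
      exact ih h (fun i h1 h2 => hfresh i h1 (by omega))
    · have : j = t := by omega
      subst this
      exact PySem.Dict.get?_insert_self _ _ _

-- A's loop, terminating case: the remainder dies at index mu.
theorem A_loop_zero (b x0 : Int) (hb : 0 < b) (h0 : 0 ≤ x0) (hlt : x0 < b)
    (P : List Char) (mu : Nat) (hz : pvSeq b x0 mu = 0)
    (hfresh : ∀ i j, i < j → j < mu → pvSeq b x0 i ≠ pvSeq b x0 j)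
    (hnz : ∀ t, t < mu → pvSeq b x0 t ≠ 0) :
    ∀ fuel t, t ≤ mu → mu - t ≤ fuel →
      naiveLoopA b fuel (P ++ pvSeg b x0 0 t) (mpAt b x0 (P.length : Int) t) (pvSeq b x0 t)
        = P ++ pvSeg b x0 0 mu := by
  intro fuel
  induction fuel with
  | zero =>
    intro t h1 h2
    have : t = mu := by omega
    subst this
    rfl
  | succ fuel ih =>
    intro t h1 h2
    rcases Nat.eq_or_lt_of_le h1 with he | hlt'
    · subst he
      rw [naiveLoopA, if_neg (by rw [hz]; omega)]
    · have hpos : pvSeq b x0 t > 0 := by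
        have := (pvSeq_bounds b x0 hb h0 hlt t).1
        have := hnz t hlt'
        omega
      rw [naiveLoopA, if_pos hpos,
        mpAt_get_none b x0 _ t _ (fun i hi => hfresh i t hi hlt')]
      simp only
      have hlen : (((P ++ pvSeg b x0 0 t).length : Nat) : Int) = (P.length : Int) + (t : Int) := by
        rw [List.length_append, pvSeg_len b x0 hb h0 hlt]; push_cast; ring
      rw [hlen, ← mpAt_succ]
      have haux : P ++ pvSeg b x0 0 t ++ PySem.Int.toChars (PySem.Int.floordiv (pvSeq b x0 t * 10) b)
          = P ++ pvSeg b x0 0 (t + 1) := by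
        rw [pvSeg_succ, mul_comm]
        simp [pvDig]
      have hrem : PySem.Int.mod (pvSeq b x0 t * 10) b = pvSeq b x0 (t + 1) := by
        rw [pvSeq_succ, pvF, mul_comm]
      rw [haux, hrem]
      exact ih (t + 1) (by omega) (by omega)

-- A's loop, repeating case: the dictionary hit at index mu + lam brackets the cycle.
theorem A_loop_col (b x0 : Int) (hb : 0 < b) (h0 : 0 ≤ x0) (hlt : x0 < b)
    (P : List Char) (mu lam : Nat) (hlam : 1 ≤ lam)
    (hspec : pvSeq b x0 (mu + lam) = pvSeq b x0 mu)
    (hdist : ∀ i j, i < j → j < mu + lam → pvSeq b x0 i ≠ pvSeq b x0 j)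
    (hnz : ∀ t, t ≤ mu + lam → pvSeq b x0 t ≠ 0) :
    ∀ fuel t, t ≤ mu + lam → mu + lam - t < fuel →
      naiveLoopA b fuel (P ++ pvSeg b x0 0 t) (mpAt b x0 (P.length : Int) t) (pvSeq b x0 t)
        = P ++ (pvSeg b x0 0 mu ++ '(' :: (pvSeg b x0 mu lam ++ [')'])) := by
  intro fuel
  induction fuel with
  | zero => omega
  | succ fuel ih =>
    intro t h1 h2
    have hpos : pvSeq b x0 t > 0 := by
      have := (pvSeq_bounds b x0 hb h0 hlt t).1
      have := hnz t h1
      omega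
    rcases Nat.eq_or_lt_of_le h1 with he | hlt'
    · subst he
      rw [naiveLoopA, if_pos (by rw [hspec] at hpos ⊢; exact hpos)]
      rw [hspec, mpAt_get_some b x0 _ _ mu (by omega) (fun i hi1 hi2 => Ne.symm (hdist mu i hi1 hi2))]
      simp only
      have hP : 0 ≤ (P.length : Int) + (mu : Int) := by positivity
      rw [PySem.List.slice_to _ hP, PySem.List.slice_from _ hP]
      have hsplit : pvSeg b x0 0 (mu + lam) = pvSeg b x0 0 mu ++ pvSeg b x0 mu lam := by
        rw [pvSeg_split]; simp
      have htoNat : ((P.length : Int) + (mu : Int)).toNat = (P ++ pvSeg b x0 0 mu).length := by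
        rw [List.length_append, pvSeg_len b x0 hb h0 hlt]; omega
      rw [hsplit, ← List.append_assoc, htoNat, List.take_left, List.drop_left]
      simp
    · rw [naiveLoopA, if_pos hpos,
        mpAt_get_none b x0 _ t _ (fun i hi => hdist i t hi hlt')]
      simp only
      have hlen : (((P ++ pvSeg b x0 0 t).length : Nat) : Int) = (P.length : Int) + (t : Int) := by
        rw [List.length_append, pvSeg_len b x0 hb h0 hlt]; push_cast; ring
      rw [hlen, ← mpAt_succ]
      have haux : P ++ pvSeg b x0 0 t ++ PySem.Int.toChars (PySem.Int.floordiv (pvSeq b x0 t * 10) b)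
          = P ++ pvSeg b x0 0 (t + 1) := by
        rw [pvSeg_succ, mul_comm]
        simp [pvDig]
      have hrem : PySem.Int.mod (pvSeq b x0 t * 10) b = pvSeq b x0 (t + 1) := by
        rw [pvSeq_succ, pvF, mul_comm]
      rw [haux, hrem]
      exact ih (t + 1) (by omega) (by omega)

-- B's digit-emission loop.
theorem altEmit_eq (b x0 : Int) :
    ∀ n j, altEmit b n (pvSeq b x0 j) = (pvSeg b x0 j n, pvSeq b x0 (j + n)) := by
  intro n
  induction n with
  | zero => intro j; simp [altEmit, pvSeg_zero]
  | succ n ih =>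
    intro j
    rw [altEmit]
    have hrem : PySem.Int.mod (10 * pvSeq b x0 j) b = pvSeq b x0 (j + 1) := by
      rw [pvSeq_succ, pvF]
    rw [hrem, ih (j + 1), pvSeg_cons]
    exact Prod.ext (by simp [pvDig]) (by simp; congr 1; omega)

-- B's Floyd meet loop.
theorem altMeet_eq (b x0 : Int) (mu lam : Nat)
    (hspec : pvSeq b x0 (mu + lam) = pvSeq b x0 mu)
    (hkey : ∀ j m : Nat, 0 < m → pvSeq b x0 (j + m) = pvSeq b x0 j → mu ≤ j ∧ lam ∣ m)
    (iStar : Nat) (h1 : 1 ≤ iStar) (h2 : mu ≤ iStar) (h3 : lam ∣ iStar)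
    (hmin : ∀ i, 1 ≤ i → i < iStar → ¬(mu ≤ i ∧ lam ∣ i)) :
    ∀ fuel i, 1 ≤ i → i ≤ iStar → iStar - i ≤ fuel →
      altMeet b fuel (pvSeq b x0 i) (pvSeq b x0 (2 * i)) = pvSeq b x0 (2 * iStar) := by
  have hmeet : ∀ i, mu ≤ i → lam ∣ i → pvSeq b x0 (2 * i) = pvSeq b x0 i := by
    intro i hi hd
    have := per_ge b x0 mu lam hspec i (i / lam) hi
    rw [Nat.div_mul_cancel hd] at this
    rw [two_mul]
    exact this
  intro fuel
  induction fuel with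
  | zero =>
    intro i hi1 hi2 hi3
    have : i = iStar := by omega
    subst this
    rfl
  | succ fuel ih =>
    intro i hi1 hi2 hi3
    rcases Nat.eq_or_lt_of_le hi2 with he | hlt'
    · subst he
      rw [altMeet, if_neg (by simp [hmeet _ h2 h3])]
    · have hne : pvSeq b x0 i ≠ pvSeq b x0 (2 * i) := by
        intro he
        have := hkey i i hi1 (by rw [show i + i = 2 * i by ring]; exact he.symm)
        exact hmin i hi1 hlt' this
      rw [altMeet, if_pos hne]
      have e1 : PySem.Int.mod (10 * pvSeq b x0 i) b = pvSeq b x0 (i + 1) := by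
        rw [pvSeq_succ, pvF]
      have e2 : PySem.Int.mod (10 * (PySem.Int.mod (10 * pvSeq b x0 (2 * i)) b)) b
          = pvSeq b x0 (2 * (i + 1)) := by
        rw [show 2 * (i + 1) = 2 * i + 1 + 1 by ring, pvSeq_succ, pvSeq_succ, pvF, pvF]
      rw [e1, e2]
      exact ih (i + 1) (by omega) (by omega) (by omega)

-- B's cycle-start loop.
theorem altMu_eq (b x0 : Int) (mu lam : Nat)
    (hspec : pvSeq b x0 (mu + lam) = pvSeq b x0 mu)
    (hkey : ∀ j m : Nat, 0 < m → pvSeq b x0 (j + m) = pvSeq b x0 j → mu ≤ j ∧ lam ∣ m)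
    (iStar : Nat) (h1 : 1 ≤ iStar) (h3 : lam ∣ iStar) :
    ∀ fuel j, j ≤ mu → mu - j ≤ fuel →
      altMu b fuel (pvSeq b x0 j) (pvSeq b x0 (2 * iStar + j)) j = (pvSeq b x0 mu, mu) := by
  have h2i : pvSeq b x0 (2 * iStar + mu) = pvSeq b x0 mu := by
    have := per_ge b x0 mu lam hspec mu (2 * (iStar / lam)) le_rfl
    rw [show mu + 2 * (iStar / lam) * lam = 2 * (iStar / lam * lam) + mu by ring,
      Nat.div_mul_cancel h3] at this
    exact this
  intro fuel
  induction fuel with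
  | zero =>
    intro j hj1 hj2
    have : j = mu := by omega
    subst this
    rfl
  | succ fuel ih =>
    intro j hj1 hj2
    rcases Nat.eq_or_lt_of_le hj1 with he | hlt'
    · subst he
      rw [altMu, if_neg (by simp [h2i])]
    · have hne : pvSeq b x0 j ≠ pvSeq b x0 (2 * iStar + j) := by
        intro he
        have := (hkey j (2 * iStar) (by omega)
          (by rw [show j + 2 * iStar = 2 * iStar + j by ring]; exact he.symm)).1
        omega
      rw [altMu, if_pos hne]
      have e1 : PySem.Int.mod (10 * pvSeq b x0 j) b = pvSeq b x0 (j + 1) := by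
        rw [pvSeq_succ, pvF]
      have e2 : PySem.Int.mod (10 * pvSeq b x0 (2 * iStar + j)) b
          = pvSeq b x0 (2 * iStar + (j + 1)) := by
        rw [show 2 * iStar + (j + 1) = (2 * iStar + j) + 1 by ring, pvSeq_succ, pvF]
      rw [e1, e2]
      exact ih (j + 1) (by omega) (by omega)

-- B's cycle-length loop.
theorem altLam_eq (b x0 : Int) (mu lam : Nat) (hlam : 1 ≤ lam)
    (hspec : pvSeq b x0 (mu + lam) = pvSeq b x0 mu)
    (hkey : ∀ j m : Nat, 0 < m → pvSeq b x0 (j + m) = pvSeq b x0 j → mu ≤ j ∧ lam ∣ m) :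
    ∀ fuel k, 1 ≤ k → k ≤ lam → lam - k ≤ fuel →
      altLam b (pvSeq b x0 mu) fuel (pvSeq b x0 (mu + k)) k = lam := by
  intro fuel
  induction fuel with
  | zero =>
    intro k hk1 hk2 hk3
    have : k = lam := by omega
    subst this
    rfl
  | succ fuel ih =>
    intro k hk1 hk2 hk3
    rcases Nat.eq_or_lt_of_le hk2 with he | hlt'
    · subst he
      rw [altLam, if_neg (by simp [hspec])]
    · have hne : pvSeq b x0 (mu + k) ≠ pvSeq b x0 mu := by
        intro he
        have := (hkey mu k (by omega) he).2
        have := Nat.le_of_dvd (by omega) this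
        omega
      rw [altLam, if_pos hne]
      have e1 : PySem.Int.mod (10 * pvSeq b x0 (mu + k)) b = pvSeq b x0 (mu + (k + 1)) := by
        rw [show mu + (k + 1) = (mu + k) + 1 by ring, pvSeq_succ, pvF]
      rw [e1]
      exact ih (k + 1) (by omega) (by omega) (by omega)

-- ===== VERDICT (by name: the statement is the Claim_ definition above) =====
theorem naive_approach_spec : Claim_equal_naive_approach := by
  intro a b _ hbne
  unfold Spec_naive_approach naive_approach naive_approach_alt
  simp only
  have hb : 0 < |b| := abs_pos.mpr hbne
  by_cases h0 : PySem.Int.mod |a| |b| = 0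
  · rw [if_pos h0, if_pos h0]
  · rw [if_neg h0, if_neg h0]
    set head := (if xor (decide (a < 0)) (decide (b < 0)) then ['-'] else []) ++
      PySem.Int.toChars (PySem.Int.floordiv |a| |b|) with hheaddef
    set b' := |b| with hb'def
    set x0 := PySem.Int.mod |a| b' with hx0def
    have hge : 0 ≤ x0 := PySem.Int.mod_nonneg _ hb
    have hlt : x0 < b' := PySem.Int.mod_lt _ hb
    obtain ⟨mu, lam, hlam, hbound, hspec, hkey⟩ := exists_mu_lam b' x0 hb hge hlt
    have hg0 : pvSeq b' x0 0 = x0 := rfl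
    -- the Floyd meeting index: least positive multiple of lam that is ≥ mu
    have hiex : ∃ i, 1 ≤ i ∧ mu ≤ i ∧ lam ∣ i := by
      refine ⟨lam * (mu + 1), by nlinarith, by nlinarith, Dvd.intro _ rfl⟩
    have hi1 : 1 ≤ Nat.find hiex := (Nat.find_spec hiex).1
    have hi2 : mu ≤ Nat.find hiex := (Nat.find_spec hiex).2.1
    have hi3 : lam ∣ Nat.find hiex := (Nat.find_spec hiex).2.2
    have hmin : ∀ i, 1 ≤ i → i < Nat.find hiex → ¬(mu ≤ i ∧ lam ∣ i) := fun i h1 h2 hc =>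
      Nat.find_min hiex h2 ⟨h1, hc.1, hc.2⟩
    have hiB : Nat.find hiex ≤ mu + lam := by
      have h5 := Nat.div_add_mod mu lam
      have h6 : mu % lam < lam := Nat.mod_lt mu (by omega)
      have hc : 1 ≤ lam * (mu / lam + 1) ∧ mu ≤ lam * (mu / lam + 1) ∧
          lam ∣ lam * (mu / lam + 1) := ⟨by nlinarith, by nlinarith, Dvd.intro _ rfl⟩
      have := Nat.find_min' hiex hc
      have h7 : lam * (mu / lam + 1) = lam * (mu / lam) + lam := by ring
      omega
    -- B's loops evaluate along the orbit
    have e1 : PySem.Int.mod (10 * x0) b' = pvSeq b' x0 1 := by rw [pvSeq_succ]; rfl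
    have e2 : PySem.Int.mod (10 * pvSeq b' x0 1) b' = pvSeq b' x0 (2 * 1) := by
      rw [show (2 * 1 : Nat) = 1 + 1 by omega, pvSeq_succ]; rfl
    have hMeet : altMeet b' (b'.toNat + 1) (PySem.Int.mod (10 * x0) b')
        (PySem.Int.mod (10 * PySem.Int.mod (10 * x0) b') b')
        = pvSeq b' x0 (2 * Nat.find hiex) := by
      rw [e1, e2]
      exact altMeet_eq b' x0 mu lam hspec hkey (Nat.find hiex) hi1 hi2 hi3 hmin
        (b'.toNat + 1) 1 le_rfl hi1 (by omega)
    have hMu : altMu b' (b'.toNat + 1) x0 (pvSeq b' x0 (2 * Nat.find hiex)) 0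
        = (pvSeq b' x0 mu, mu) := by
      have := altMu_eq b' x0 mu lam hspec hkey (Nat.find hiex) hi1 hi3
        (b'.toNat + 1) 0 (by omega) (by omega)
      simpa using this
    have hEmit0 : altEmit b' mu x0 = (pvSeg b' x0 0 mu, pvSeq b' x0 mu) := by
      have := altEmit_eq b' x0 mu 0
      simpa using this
    simp only [hMeet, hMu, hEmit0]
    by_cases hz : pvSeq b' x0 mu = 0
    · rw [if_pos hz]
      have hA : naiveLoopA b' (b'.toNat + 1) (head ++ ['.']) PySem.Dict.empty x0
          = (head ++ ['.']) ++ pvSeg b' x0 0 mu := by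
        have := A_loop_zero b' x0 hb hge hlt (head ++ ['.']) mu hz
          (fun i j hij hj => pv_distinct b' x0 mu lam hkey i j hij (by omega))
          (pv_nz_lt_mu b' x0 mu lam hkey) (b'.toNat + 1) 0 (by omega) (by omega)
        simpa [pvSeg_zero, mpAt_zero] using this
      rw [hA]
      simp
    · rw [if_neg hz]
      have eL : PySem.Int.mod (10 * pvSeq b' x0 mu) b' = pvSeq b' x0 (mu + 1) := by
        rw [pvSeq_succ, pvF]
      have hLam : altLam b' (pvSeq b' x0 mu) (b'.toNat + 1)
          (PySem.Int.mod (10 * pvSeq b' x0 mu) b') 1 = lam := by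
        rw [eL]
        exact altLam_eq b' x0 mu lam hlam hspec hkey (b'.toNat + 1) 1 le_rfl hlam (by omega)
      have hEmitC : altEmit b' lam (pvSeq b' x0 mu)
          = (pvSeg b' x0 mu lam, pvSeq b' x0 (mu + lam)) := by
        have := altEmit_eq b' x0 lam mu
        simpa using this
      rw [hLam, hEmitC]
      have hA : naiveLoopA b' (b'.toNat + 1) (head ++ ['.']) PySem.Dict.empty x0
          = (head ++ ['.']) ++
            (pvSeg b' x0 0 mu ++ '(' :: (pvSeg b' x0 mu lam ++ [')'])) := by
        have := A_loop_col b' x0 hb hge hlt (head ++ ['.']) mu lam hlam hspec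
          (pv_distinct b' x0 mu lam hkey)
          (pv_nz_col b' x0 mu lam hlam hspec hkey hz) (b'.toNat + 1) 0 (by omega) (by omega)
        simpa [pvSeg_zero, mpAt_zero] using this
      rw [hA]
      simp
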